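-- pv_equiv track=rewrite | github.com/Notliker/ChatBot_Document-analyser | utils/metrics.py | lenght_metric
-- ===== SOURCE A (Python) =====
-- def lenght_metric(response: str):
--     """
--     Метрики длины ответа
--     """
--     words = response.split()
--     sentences = response.split('.')
--
--     return {
--         'word_count': len(words),
--         'char_count': len(response),
--         'sentence_count': len([s for s in sentences if s.strip()])
--     }
-- ===== SOURCE B (Python) =====
-- def lenght_metric(response: str):
--     """
--     Метрики длины ответа — single pass over the characters.
--     """
--     word_count = 0
--     sentence_count = 0
--     in_word = False
--     seg_text = False
--     for c in response:
--         if c.isspace():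
--             in_word = False
--         elif not in_word:
--             word_count += 1
--             in_word = True
--         if c == '.':
--             if seg_text:
--                 sentence_count += 1
--                 seg_text = False
--         elif not c.isspace():
--             seg_text = True
--     if seg_text:
--         sentence_count += 1
--     return {
--         'word_count': word_count,
--         'char_count': len(response),
--         'sentence_count': sentence_count,
--     }
-- ===== Notes on version B (the rewrite author's own statement) =====
-- stated objective: alternative
-- what changed: Replaces the two split()-based passes (whitespace split and '.'-split with per-segment strip) by a single left-to-right scan of the characters maintaining in-word and segment-has-text flags, allocating no intermediate lists.
import Mathlib
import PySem

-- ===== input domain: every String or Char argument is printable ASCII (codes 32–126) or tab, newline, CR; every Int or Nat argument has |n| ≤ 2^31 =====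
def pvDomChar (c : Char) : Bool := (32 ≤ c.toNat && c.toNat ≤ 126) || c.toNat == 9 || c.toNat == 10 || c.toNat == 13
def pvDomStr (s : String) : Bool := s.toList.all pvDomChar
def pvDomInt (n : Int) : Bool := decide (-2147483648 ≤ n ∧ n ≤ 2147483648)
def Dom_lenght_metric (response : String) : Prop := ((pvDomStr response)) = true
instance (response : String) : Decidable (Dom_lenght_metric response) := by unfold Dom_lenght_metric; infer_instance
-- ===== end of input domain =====

-- B replaces A's two split()-based passes by a single left-to-right scan of the characters (alternative decomposition, same result).

-- ===== PORT A =====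
def lenght_metric (response : String) : List (String × Int) :=
  let words := PySem.Chars.split₀ response.toList
  let sentences := PySem.Chars.splitOn response.toList ['.']
  [("word_count", PySem.List.len words),
   ("char_count", PySem.Str.len response),
   ("sentence_count", PySem.List.len (sentences.filter (fun s => !(PySem.Chars.strip s).isEmpty)))]

-- ===== PORT B =====
-- one step of Source B's loop: state = (word_count, in_word, sentence_count, seg_text)
def pvAltStep (st : Int × Bool × Int × Bool) (c : Char) : Int × Bool × Int × Bool :=
  let wc := st.1; let inw := st.2.1; let sc := st.2.2.1; let seg := st.2.2.2
  let p1 : Int × Bool :=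
    if PySem.Chars.isspace c then (wc, false)
    else if inw then (wc, inw) else (wc + 1, true)
  let p2 : Int × Bool :=
    if c = '.' then (if seg then (sc + 1, false) else (sc, seg))
    else if PySem.Chars.isspace c then (sc, seg) else (sc, true)
  (p1.1, p1.2, p2.1, p2.2)

def lenght_metric_alt (response : String) : List (String × Int) :=
  let st := response.toList.foldl pvAltStep (0, false, 0, false)
  [("word_count", st.1),
   ("char_count", PySem.Str.len response),
   ("sentence_count", st.2.2.1 + (if st.2.2.2 then 1 else 0))]

-- ===== PRECONDITION & SPEC =====
def Spec_lenght_metric (response : String) (out : List (String × Int)) : Prop := out = lenght_metric_alt response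
instance (response : String) (out : List (String × Int)) : Decidable (Spec_lenght_metric response out) := by unfold Spec_lenght_metric; infer_instance

-- ===== CLAIM (what is proved, stated in full; the proofs are below) =====
def Claim_equal_lenght_metric : Prop := ∀ (response : String), Dom_lenght_metric response → Spec_lenght_metric response (lenght_metric response)

-- ===== LEMMAS AND PROOFS =====

-- number of words still to be counted, given whether the scan is inside a word
def pvW (inw : Bool) : List Char → Nat
  | [] => 0
  | c :: cs => if PySem.Chars.isspace c then pvW false cs
               else (if inw then 0 else 1) + pvW true cs

-- final in-word flag of the scan
def pvWFin (inw : Bool) : List Char → Bool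
  | [] => inw
  | c :: cs => if PySem.Chars.isspace c then pvWFin false cs else pvWFin true cs

-- sentences closed by '.' during the scan, given whether the current segment has text
def pvS (seg : Bool) : List Char → Nat
  | [] => 0
  | c :: cs => if c = '.' then (if seg then 1 else 0) + pvS false cs
               else if PySem.Chars.isspace c then pvS seg cs
               else pvS true cs

-- final segment-has-text flag of the scan
def pvSFin (seg : Bool) : List Char → Bool
  | [] => seg
  | c :: cs => if c = '.' then pvSFin false cs
               else if PySem.Chars.isspace c then pvSFin seg cs
               else pvSFin true cs

-- B's fold computes exactly the four scan functions above
lemma pvFold_spec (cs : List Char) : ∀ (wc : Int) (inw : Bool) (sc : Int) (seg : Bool),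
    List.foldl pvAltStep (wc, inw, sc, seg) cs
      = (wc + (pvW inw cs : Int), pvWFin inw cs, sc + (pvS seg cs : Int), pvSFin seg cs) := by
  induction cs with
  | nil => intro wc inw sc seg; simp [pvW, pvWFin, pvS, pvSFin]
  | cons c cs ih =>
    intro wc inw sc seg
    rw [List.foldl_cons]
    by_cases hd : c = '.'
    · subst hd
      have hsp : PySem.Chars.isspace '.' = false := by decide
      cases inw <;> cases seg <;>
        · simp only [pvAltStep]
          simp [hsp]
          rw [ih]
          simp [pvW, pvWFin, pvS, pvSFin, hsp]
          try push_cast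
          try ring_nf
          try exact ⟨trivial, trivial⟩
    · by_cases hsp : PySem.Chars.isspace c = true <;>
        cases inw <;> cases seg <;>
          · simp only [pvAltStep]
            simp [hsp, hd]
            rw [ih]
            simp [pvW, pvWFin, pvS, pvSFin, hsp, hd]
            try push_cast
            try ring_nf
            try exact ⟨trivial, trivial⟩

-- A's split() word count equals the scan's word count
lemma pvSplit₀_go_length (rest : List Char) : ∀ (cur : List Char) (acc : List (List Char)),
    (PySem.Chars.split₀.go rest cur acc).length
      = acc.length + (if cur.isEmpty then 0 else 1) + pvW (!cur.isEmpty) rest := by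
  induction rest with
  | nil =>
    intro cur acc
    cases cur <;> simp [PySem.Chars.split₀.go, pvW]
  | cons c rest ih =>
    intro cur acc
    by_cases hsp : PySem.Chars.isspace c = true
    · cases cur with
      | nil => simp [PySem.Chars.split₀.go, hsp, ih, pvW]
      | cons x xs => simp [PySem.Chars.split₀.go, hsp, ih, pvW]
    · cases cur with
      | nil => simp [PySem.Chars.split₀.go, hsp, ih, pvW]; omega
      | cons x xs => simp [PySem.Chars.split₀.go, hsp, ih, pvW]

-- s.strip() is empty exactly when s is all whitespace
lemma pvStrip_isEmpty (s : List Char) :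
    (PySem.Chars.strip s).isEmpty = s.all PySem.Chars.isspace := by
  simp only [PySem.Chars.strip, PySem.Chars.rstrip, PySem.Chars.lstrip]
  rw [Bool.eq_iff_iff]
  simp only [List.isEmpty_iff, List.reverse_eq_nil_iff, List.dropWhile_eq_nil_iff,
    List.mem_reverse, List.all_eq_true]
  constructor
  · intro h x hx
    rw [← List.takeWhile_append_dropWhile (p := PySem.Chars.isspace) (l := s)] at hx
    rcases List.mem_append.1 hx with h1 | h2
    · exact List.mem_takeWhile_imp h1
    · exact h x h2
  · intro h x hx
    exact h x ((List.dropWhile_sublist _).subset hx)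

-- non-blank truthiness as an any-test
lemma pvStrip_any (s : List Char) :
    (!(PySem.Chars.strip s).isEmpty) = s.any (fun c => !PySem.Chars.isspace c) := by
  rw [pvStrip_isEmpty, Bool.eq_iff_iff]
  simp [List.any_eq_true]

-- unfolding split('.')'s worker one step
lemma pvGoDot (fuel : Nat) (rest cur : List Char) (acc : List (List Char)) :
    PySem.Chars.splitOn.go ['.'] (fuel+1) ('.'::rest) cur acc
      = PySem.Chars.splitOn.go ['.'] fuel rest [] (cur.reverse :: acc) := by
  simp [PySem.Chars.splitOn.go, List.isPrefixOf]

lemma pvGoOther (fuel : Nat) (c : Char) (rest cur : List Char) (acc : List (List Char))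
    (h : ¬ c = '.') :
    PySem.Chars.splitOn.go ['.'] (fuel+1) (c::rest) cur acc
      = PySem.Chars.splitOn.go ['.'] fuel rest (c :: cur) acc := by
  simp [PySem.Chars.splitOn.go, List.isPrefixOf]
  exact fun h' => absurd h'.symm h

-- A's non-blank sentence count equals the scan's sentence count
lemma pvSplitOn_go_count (fuel : Nat) : ∀ (l cur : List Char) (acc : List (List Char)),
    l.length < fuel →
    ((PySem.Chars.splitOn.go ['.'] fuel l cur acc).filter (fun p => p.any (fun c => !PySem.Chars.isspace c))).length
      = (acc.filter (fun p => p.any (fun c => !PySem.Chars.isspace c))).length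
        + pvS (cur.any (fun c => !PySem.Chars.isspace c)) l
        + (if pvSFin (cur.any (fun c => !PySem.Chars.isspace c)) l then 1 else 0) := by
  induction fuel with
  | zero => intro l cur acc h; omega
  | succ fuel ih =>
    intro l cur acc h
    cases l with
    | nil =>
      simp only [PySem.Chars.splitOn.go, pvS, pvSFin, List.filter_reverse, List.filter_cons,
        List.length_reverse, List.any_reverse]
      by_cases hc : cur.any (fun c => !PySem.Chars.isspace c) = true <;> simp [hc]
    | cons c rest =>
      have hrest : rest.length < fuel := by simpa using Nat.lt_of_succ_lt_succ h
      by_cases hd : c = '.'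
      · subst hd
        rw [pvGoDot, ih rest [] (cur.reverse :: acc) hrest]
        simp only [pvS, pvSFin, List.filter_cons, List.any_reverse, List.any_nil]
        by_cases hc : cur.any (fun c => !PySem.Chars.isspace c) = true <;>
          by_cases hf : pvSFin false rest = true <;> simp [hc, hf] <;> omega
      · rw [pvGoOther fuel c rest cur acc hd, ih rest (c :: cur) acc hrest]
        by_cases hsp : PySem.Chars.isspace c = true <;>
          simp [pvS, pvSFin, hd, hsp, List.any_cons]

-- A-side word count in scan form
lemma pvA_words (cs : List Char) : (PySem.Chars.split₀ cs).length = pvW false cs := by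
  rw [show PySem.Chars.split₀ cs = PySem.Chars.split₀.go cs [] [] from rfl, pvSplit₀_go_length]
  simp

-- A-side sentence count in scan form
lemma pvA_sent (cs : List Char) :
    (List.filter (fun s => !(PySem.Chars.strip s).isEmpty) (PySem.Chars.splitOn cs ['.'])).length
      = pvS false cs + (if pvSFin false cs then 1 else 0) := by
  rw [List.filter_congr (fun s _ => pvStrip_any s),
      show PySem.Chars.splitOn cs ['.']
        = PySem.Chars.splitOn.go ['.'] (cs.length + 1) cs [] [] from rfl,
      pvSplitOn_go_count (cs.length + 1) cs [] [] (Nat.lt_succ_self _)]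
  simp

-- ===== VERDICT (by name: the statement is the Claim_ definition above) =====
theorem lenght_metric_spec : Claim_equal_lenght_metric := by
  intro response _
  unfold Spec_lenght_metric lenght_metric lenght_metric_alt
  rw [pvFold_spec]
  simp [PySem.List.len_eq, pvA_words, pvA_sent]
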